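/- GENERATED by farm/mkstatement.py from design/units.tsv (unit `start_decoder.F4c`) and the assertions of Vorbis/Spec/StartDecoderF4.lean — do not edit.
   THE STATEMENT of the proof unit `start_decoder.F4c`: segment F4c of `start_decoder` (23 instructions; entries 0x1154d2;
   exits 0x1154ee,0x113b22; ranges 0x1154d2-0x1154e9 + 0x11555e-0x1155a7)
   takes each of its entry assertions to one of its exit assertions (`Vorbis.Spec.StartDecoder.SegF4c`), given the contracts of its callees.
   What the names mean: Vorbis/Spec/Basic.lean (the shared hypotheses), Vorbis/Spec/StartDecoderF4.lean (the assertions). The theorem to prove: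
   `theorem start_decoder_F4c_ok : Vorbis.Spec.start_decoder_F4c.Statement`. -/
import Vorbis.Spec.Leaves
import Vorbis.Spec.Reader
import Vorbis.Spec.StartDecoderF4
namespace Vorbis.Spec.start_decoder_F4c
open X86 X86.User Asan

/-- The statement of unit `start_decoder.F4c`. -/
def Statement : Prop :=
  ∀ (Lay : Layout) (_hLay : Lay.hi = 0x1000000) (μ : Microarch) (_hμ : UserX.MicroOK μ) (u₀ : State)
    (_hcode : HasCodeNat Lay u₀ Vorbis.L.start_decoder.entry Vorbis.Code.code_start_decoder.nat Vorbis.L.start_decoder.size)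
    (_h_get_bits : ∀ (others : List Obj) (frames : List (Nat × FrameLayout)) (Blk : Block → Prop) (len : Nat), Calls Lay μ Vorbis.WayInv (Vorbis.conv u₀) Vorbis.L.get_bits.entry (Vorbis.Spec.get_bits.spec others frames Blk len))
    (_h_asan_store1_noabort : Asan.SmallCheck Lay μ Vorbis.WayInv (Vorbis.CodeOK u₀) [.rax, .rdx] 1 Vorbis.L.__asan_store1_noabort.entry)
    (_h_asan_load4_noabort : Asan.SmallCheck Lay μ Vorbis.WayInv (Vorbis.CodeOK u₀) [.rax, .rcx, .rdx] 4 Vorbis.L.__asan_load4_noabort.entry)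
    (_h_error : ∀ (others : List Obj) (frames : List (Nat × FrameLayout)), Calls Lay μ Vorbis.WayInv (Vorbis.conv u₀) Vorbis.L.error.entry (Vorbis.Spec.error.spec others frames)),
    Vorbis.Spec.StartDecoder.SegF4c Lay μ u₀

end Vorbis.Spec.start_decoder_F4c
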